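-- pv_equiv track=rewrite | github.com/wulfsagedev/civaccount | enrich-documents-sources.py | generate_documents_block
-- ===== SOURCE A (Python) =====
-- def escape_ts(s):
--     return s.replace("\\", "\\\\").replace('"', '\\"').replace("\n", " ")
--
-- def generate_documents_block(name, urls):
--     """Generate documents array from available URLs."""
--     docs = []
--
--     if "accounts_url" in urls:
--         docs.append({
--             "title": f"Statement of Accounts 2023-24",
--             "url": urls["accounts_url"],
--             "type": "accounts",
--             "year": "2023-24",
--         })
--
--     if "budget_url" in urls:
--         docs.append({
--             "title": f"Budget 2025-26",
--             "url": urls["budget_url"],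
--             "type": "budget",
--             "year": "2025-26",
--         })
--
--     if "transparency_url" in urls:
--         docs.append({
--             "title": f"Transparency Data",
--             "url": urls["transparency_url"],
--             "type": "report",
--             "year": "2024-25",
--         })
--
--     if not docs:
--         return None
--
--     lines = ["      documents: ["]
--     for d in docs:
--         title = escape_ts(d["title"])
--         url = escape_ts(d["url"])
--         lines.append(f'        {{ title: "{title}", url: "{url}", type: "{d["type"]}", year: "{d["year"]}" }},')
--     lines.append("      ],")
--     return "\n".join(lines)
-- ===== SOURCE B (Python) =====
-- def escape_ts(s):
--     return s.replace("\\", "\\\\").replace('"', '\\"').replace("\n", " ")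
--
-- def generate_documents_block(name, urls):
--     """Generate documents array from available URLs."""
--     def emit(specs):
--         # Tail of the block, built back-to-front by recursion; None means nothing emitted.
--         if not specs:
--             return None
--         key, title, typ, year = specs[0]
--         rest = emit(specs[1:])
--         if key not in urls:
--             return rest
--         line = f'        {{ title: "{escape_ts(title)}", url: "{escape_ts(urls[key])}", type: "{typ}", year: "{year}" }},'
--         return line if rest is None else line + "\n" + rest
--
--     body = emit([
--         ("accounts_url", "Statement of Accounts 2023-24", "accounts", "2023-24"),
--         ("budget_url", "Budget 2025-26", "budget", "2025-26"),
--         ("transparency_url", "Transparency Data", "report", "2024-25"),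
--     ])
--     if body is None:
--         return None
--     return "      documents: [\n" + body + "\n      ],"
-- ===== Notes on version B (the rewrite author's own statement) =====
-- stated objective: alternative
-- what changed: Replaces A's two staged passes (build a list of dict records, then format each into a line and join a lines list) by a single recursive descent over a spec list that builds the output string directly back-to-front with string concatenation, using no intermediate lists and no join.
import Mathlib
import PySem

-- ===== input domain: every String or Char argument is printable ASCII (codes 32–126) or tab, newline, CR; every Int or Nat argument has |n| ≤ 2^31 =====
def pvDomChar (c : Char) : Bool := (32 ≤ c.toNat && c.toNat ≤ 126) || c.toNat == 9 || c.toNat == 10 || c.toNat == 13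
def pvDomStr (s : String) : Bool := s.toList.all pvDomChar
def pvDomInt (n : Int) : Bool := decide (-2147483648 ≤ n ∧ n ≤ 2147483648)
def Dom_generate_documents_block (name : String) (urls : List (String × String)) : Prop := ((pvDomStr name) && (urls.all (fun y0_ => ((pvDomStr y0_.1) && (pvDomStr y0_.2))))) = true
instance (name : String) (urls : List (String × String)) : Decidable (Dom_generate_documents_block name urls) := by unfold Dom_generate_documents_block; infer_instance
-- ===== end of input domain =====

-- B replaces A's staged list-building + join by one recursive back-to-front direct string build; objective: alternative.

-- shared helper (both Pythons define the identical escape_ts)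
def escape_ts (s : String) : String :=
  PySem.Str.replace (PySem.Str.replace (PySem.Str.replace s "\\" "\\\\") "\"" "\\\"") "\n" " "

-- ===== PORT A =====
def generate_documents_block (name : String) (urls : List (String × String)) : Option String :=
  let d := PySem.Dict.mk urls
  let docs : List (PySem.Dict String String) := []
  let docs := if d.contains "accounts_url" then
      docs ++ [PySem.Dict.mk [("title", "Statement of Accounts 2023-24"),
        ("url", (d.get? "accounts_url").getD ""), ("type", "accounts"), ("year", "2023-24")]]
    else docs
  let docs := if d.contains "budget_url" then
      docs ++ [PySem.Dict.mk [("title", "Budget 2025-26"),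
        ("url", (d.get? "budget_url").getD ""), ("type", "budget"), ("year", "2025-26")]]
    else docs
  let docs := if d.contains "transparency_url" then
      docs ++ [PySem.Dict.mk [("title", "Transparency Data"),
        ("url", (d.get? "transparency_url").getD ""), ("type", "report"), ("year", "2024-25")]]
    else docs
  if docs.isEmpty then none
  else
    let lines := ["      documents: ["]
    -- d["title"] etc. always present in the dicts built above, so getD "" is exact here
    let lines := docs.foldl (fun ls dd =>
      let title := escape_ts ((dd.get? "title").getD "")
      let url := escape_ts ((dd.get? "url").getD "")
      ls ++ ["        { title: \"" ++ title ++ "\", url: \"" ++ url ++ "\", type: \""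
        ++ (dd.get? "type").getD "" ++ "\", year: \"" ++ (dd.get? "year").getD "" ++ "\" },"]) lines
    some (PySem.Str.join "\n" (lines ++ ["      ],"]))

-- ===== PORT B =====
-- recursive back-to-front builder: tail of the block as one string, none = nothing emitted
def pvEmit (d : PySem.Dict String String) : List (String × String × String × String) → Option String
  | [] => none
  | s :: specs =>
    let rest := pvEmit d specs
    if d.contains s.1 then
      let line := "        { title: \"" ++ escape_ts s.2.1 ++ "\", url: \""
        ++ escape_ts ((d.get? s.1).getD "") ++ "\", type: \"" ++ s.2.2.1
        ++ "\", year: \"" ++ s.2.2.2 ++ "\" },"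
      some (match rest with
        | none => line
        | some t => line ++ "\n" ++ t)
    else rest

def generate_documents_block_alt (name : String) (urls : List (String × String)) : Option String :=
  let d := PySem.Dict.mk urls
  match pvEmit d
    [("accounts_url", "Statement of Accounts 2023-24", "accounts", "2023-24"),
     ("budget_url", "Budget 2025-26", "budget", "2025-26"),
     ("transparency_url", "Transparency Data", "report", "2024-25")] with
  | none => none
  | some body => some ("      documents: [\n" ++ body ++ "\n      ],")

-- ===== PRECONDITION & SPEC =====
def Spec_generate_documents_block (name : String) (urls : List (String × String)) (out : Option String) : Prop := out = generate_documents_block_alt name urls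
instance (name : String) (urls : List (String × String)) (out : Option String) : Decidable (Spec_generate_documents_block name urls out) := by unfold Spec_generate_documents_block; infer_instance

-- ===== CLAIM (what is proved, stated in full; the proofs are below) =====
def Claim_equal_generate_documents_block : Prop := ∀ (name : String) (urls : List (String × String)), Dom_generate_documents_block name urls → Spec_generate_documents_block name urls (generate_documents_block name urls)

-- ===== LEMMAS AND PROOFS =====

-- ===== VERDICT (by name: the statement is the Claim_ definition above) =====
set_option maxRecDepth 4000 in
theorem generate_documents_block_spec : Claim_equal_generate_documents_block := by
  intro name urls _
  unfold Spec_generate_documents_block generate_documents_block generate_documents_block_alt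
  by_cases h1 : (PySem.Dict.mk urls).contains "accounts_url" <;>
  by_cases h2 : (PySem.Dict.mk urls).contains "budget_url" <;>
  by_cases h3 : (PySem.Dict.mk urls).contains "transparency_url" <;>
    simp [h1, h2, h3, pvEmit, List.foldl, PySem.Dict.get?, List.find?, PySem.Str.join] <;>
    (rw [← String.toList_inj]; simp [PySem.Chars.join, List.intercalate, List.intersperse, List.flatten])
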